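-- pv_equiv track=rewrite | github.com/Sheshaadhri14/CloudShield-AI | src/explainability.py | _prioritize_counterfactuals
-- ===== SOURCE A (Python) =====
-- def _prioritize_counterfactuals(counterfactuals, features):
--     """Rank counterfactuals by effectiveness"""
--
--     # Simple heuristic: escalation removal is highest priority
--     priority_order = [
--         'Remove privilege escalation permissions',
--         'Replace wildcard (*) with specific actions',
--         'Specify exact resource ARNs',
--         'Add MFA requirement'
--     ]
--
--     sorted_cf = []
--     for priority_change in priority_order:
--         for cf in counterfactuals:
--             if cf['change'] == priority_change:
--                 sorted_cf.append(cf)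
--
--     return sorted_cf
-- ===== SOURCE B (Python) =====
-- def _prioritize_counterfactuals(counterfactuals, features):
--     """Rank counterfactuals by effectiveness (single pass into four buckets)"""
--     esc, wild, arns, mfa = [], [], [], []
--     for cf in counterfactuals:
--         change = cf['change']
--         if change == 'Remove privilege escalation permissions':
--             esc.append(cf)
--         elif change == 'Replace wildcard (*) with specific actions':
--             wild.append(cf)
--         elif change == 'Specify exact resource ARNs':
--             arns.append(cf)
--         elif change == 'Add MFA requirement':
--             mfa.append(cf)
--     return esc + wild + arns + mfa
-- ===== Notes on version B (the rewrite author's own statement) =====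
-- stated objective: simpler
-- what changed: Replaces A's four sequential rescans of the counterfactual list (one per priority string) with a single pass that drops each counterfactual into one of four priority buckets and concatenates the buckets.
import Mathlib
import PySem

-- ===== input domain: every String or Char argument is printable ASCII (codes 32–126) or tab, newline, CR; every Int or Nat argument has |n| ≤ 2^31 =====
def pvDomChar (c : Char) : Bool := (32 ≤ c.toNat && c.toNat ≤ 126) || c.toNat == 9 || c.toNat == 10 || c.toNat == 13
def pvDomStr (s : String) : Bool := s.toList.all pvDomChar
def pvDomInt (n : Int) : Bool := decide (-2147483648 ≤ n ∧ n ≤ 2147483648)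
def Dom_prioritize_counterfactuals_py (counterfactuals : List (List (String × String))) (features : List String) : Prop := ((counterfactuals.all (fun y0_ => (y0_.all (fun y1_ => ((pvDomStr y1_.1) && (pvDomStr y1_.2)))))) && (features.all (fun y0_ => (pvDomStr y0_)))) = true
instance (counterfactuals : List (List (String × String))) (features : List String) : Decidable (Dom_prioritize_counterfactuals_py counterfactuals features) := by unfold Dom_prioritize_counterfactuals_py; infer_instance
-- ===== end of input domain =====

-- B replaces A's four sequential rescans (one per priority string) with a single pass
-- into four buckets that are concatenated at the end; objective: simpler.

-- Shared primitive: cf['change'] on the association-list encoding of a Python dict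
-- (first match; none = KeyError, excluded by Pre_).
def pvChange (cf : List (String × String)) : Option String :=
  (cf.find? (fun kv => kv.1 == "change")).map (·.2)

-- ===== PORT A =====
def prioritize_counterfactuals_py (counterfactuals : List (List (String × String))) (_features : List String) : List (List (String × String)) :=
  let priority_order : List String :=
    ["Remove privilege escalation permissions",
     "Replace wildcard (*) with specific actions",
     "Specify exact resource ARNs",
     "Add MFA requirement"]
  priority_order.foldl (fun sorted_cf priority_change =>
    counterfactuals.foldl (fun acc cf =>
      if pvChange cf == some priority_change then acc ++ [cf] else acc) sorted_cf) []

-- B's per-element bucket step (named so the fold lemma can refer to it)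
def altStep (st : List (List (String × String)) × List (List (String × String)) × List (List (String × String)) × List (List (String × String)))
    (cf : List (String × String)) :
    List (List (String × String)) × List (List (String × String)) × List (List (String × String)) × List (List (String × String)) :=
  match pvChange cf with
  | some change =>
    if change == "Remove privilege escalation permissions" then (st.1 ++ [cf], st.2.1, st.2.2.1, st.2.2.2)
    else if change == "Replace wildcard (*) with specific actions" then (st.1, st.2.1 ++ [cf], st.2.2.1, st.2.2.2)
    else if change == "Specify exact resource ARNs" then (st.1, st.2.1, st.2.2.1 ++ [cf], st.2.2.2)
    else if change == "Add MFA requirement" then (st.1, st.2.1, st.2.2.1, st.2.2.2 ++ [cf])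
    else st
  | none => st  -- KeyError in Python; outside Pre_

-- ===== PORT B =====
def prioritize_counterfactuals_py_alt (counterfactuals : List (List (String × String))) (_features : List String) : List (List (String × String)) :=
  let st := counterfactuals.foldl altStep ([], [], [], [])
  st.1 ++ st.2.1 ++ st.2.2.1 ++ st.2.2.2

-- ===== PRECONDITION & SPEC =====
-- Pre_ excludes counterfactuals lacking a 'change' key, on which Python A raises KeyError.
def Pre_prioritize_counterfactuals_py (counterfactuals : List (List (String × String))) (_features : List String) : Prop :=
  counterfactuals.all (fun cf => (pvChange cf).isSome) = true
instance (counterfactuals : List (List (String × String))) (features : List String) : Decidable (Pre_prioritize_counterfactuals_py counterfactuals features) := by unfold Pre_prioritize_counterfactuals_py; infer_instance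

def pvWitness_prioritize_counterfactuals_py : (List (List (String × String))) × List String :=
  ([[("change", "Add MFA requirement")], [("change", "Specify exact resource ARNs"), ("risk", "low")]], ["a"])

def Spec_prioritize_counterfactuals_py (counterfactuals : List (List (String × String))) (features : List String) (out : List (List (String × String))) : Prop := out = prioritize_counterfactuals_py_alt counterfactuals features
instance (counterfactuals : List (List (String × String))) (features : List String) (out : List (List (String × String))) : Decidable (Spec_prioritize_counterfactuals_py counterfactuals features out) := by unfold Spec_prioritize_counterfactuals_py; infer_instance

-- ===== CLAIM (what is proved, stated in full; the proofs are below) =====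
def Claim_equal_prioritize_counterfactuals_py : Prop := ∀ (counterfactuals : List (List (String × String))) (features : List String), Dom_prioritize_counterfactuals_py counterfactuals features → Pre_prioritize_counterfactuals_py counterfactuals features → Spec_prioritize_counterfactuals_py counterfactuals features (prioritize_counterfactuals_py counterfactuals features)

-- ===== LEMMAS AND PROOFS =====

-- B's fold state, after processing cfs starting from (a,b,c,d), is the four filters appended.
theorem altFold_eq (cfs : List (List (String × String)))
    (a b c d : List (List (String × String))) :
    cfs.foldl altStep (a, b, c, d)
    = (a ++ cfs.filter (fun cf => pvChange cf == some "Remove privilege escalation permissions"),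
       b ++ cfs.filter (fun cf => pvChange cf == some "Replace wildcard (*) with specific actions"),
       c ++ cfs.filter (fun cf => pvChange cf == some "Specify exact resource ARNs"),
       d ++ cfs.filter (fun cf => pvChange cf == some "Add MFA requirement")) := by
  induction cfs generalizing a b c d with
  | nil => simp
  | cons cf cfs ih =>
    rw [List.foldl_cons]
    cases h : pvChange cf with
    | none =>
      have hs : altStep (a, b, c, d) cf = (a, b, c, d) := by simp [altStep, h]
      rw [hs, ih]; simp [List.filter_cons, h]
    | some ch =>
      by_cases h1 : ch = "Remove privilege escalation permissions"
      · have hs : altStep (a, b, c, d) cf = (a ++ [cf], b, c, d) := by simp [altStep, h, h1]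
        rw [hs, ih]; subst h1; simp [List.filter_cons, h]
      · by_cases h2 : ch = "Replace wildcard (*) with specific actions"
        · have hs : altStep (a, b, c, d) cf = (a, b ++ [cf], c, d) := by simp [altStep, h, h1, h2]
          rw [hs, ih]; subst h2; simp [List.filter_cons, h, h1]
        · by_cases h3 : ch = "Specify exact resource ARNs"
          · have hs : altStep (a, b, c, d) cf = (a, b, c ++ [cf], d) := by simp [altStep, h, h1, h2, h3]
            rw [hs, ih]; subst h3; simp [List.filter_cons, h, h1, h2]
          · by_cases h4 : ch = "Add MFA requirement"
            · have hs : altStep (a, b, c, d) cf = (a, b, c, d ++ [cf]) := by simp [altStep, h, h1, h2, h3, h4]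
              rw [hs, ih]; subst h4; simp [List.filter_cons, h, h1, h2, h3]
            · have hs : altStep (a, b, c, d) cf = (a, b, c, d) := by simp [altStep, h, h1, h2, h3, h4]
              rw [hs, ih]; simp [List.filter_cons, h, h1, h2, h3, h4]

-- ===== VERDICT (by name: the statement is the Claim_ definition above) =====
theorem prioritize_counterfactuals_py_spec : Claim_equal_prioritize_counterfactuals_py := by
  intro cfs features _ _
  unfold Spec_prioritize_counterfactuals_py prioritize_counterfactuals_py prioritize_counterfactuals_py_alt
  simp only [List.foldl_cons, List.foldl_nil,
    PySem.List.foldl_append_if_eq_filter, altFold_eq, List.nil_append, List.append_assoc]
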